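-- pv_equiv track=rewrite | github.com/FabPrez/tactile_anomaly_detection | Memory_bank_AD/padim_tiled_runner.py | compute_tile_grid_by_size
-- ===== SOURCE A (Python) =====
-- from typing import List, Tuple, Dict
--
-- def compute_tile_grid_by_size(H: int, W: int, tile_h: int = 224, tile_w: int = 224,
--                               overlap: int = 0) -> List[Tuple[int,int,int,int]]:
--     """
--     Griglia sliding a misura fissa:
--     - tile_h/tile_w ~ 224
--     - overlap in pixel (0,16,32,...)
--     Copre tutta l'immagine (gli ultimi step sono clampati ai bordi).
--     Ritorna lista di (y,x,h,w).
--     """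
--     assert tile_h > 0 and tile_w > 0
--     stride_h = max(1, tile_h - overlap)
--     stride_w = max(1, tile_w - overlap)
--
--     rects: List[Tuple[int,int,int,int]] = []
--     y = 0
--     while True:
--         x = 0
--         h = min(tile_h, H - y)
--         while True:
--             w = min(tile_w, W - x)
--             rects.append((int(y), int(x), int(h), int(w)))
--             if x + tile_w >= W:
--                 break
--             x += stride_w
--             if x + tile_w > W:
--                 x = max(0, W - tile_w)
--         if y + tile_h >= H:
--             break
--         y += stride_h
--         if y + tile_h > H:
--             y = max(0, H - tile_h)
--     return rects
-- ===== SOURCE B (Python) =====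
-- def _axis_positions(total, tile, stride):
--     """Closed-form 1D tile start positions: 0, stride, 2*stride, ... capped by a
--     final clamped position total-tile (single tile if total <= tile)."""
--     m = total - tile
--     if m <= 0:
--         return [0]
--     q = -(-m // stride)  # ceil(m / stride)
--     return [k * stride for k in range(q)] + [m]
--
--
-- def compute_tile_grid_by_size(H, W, tile_h=224, tile_w=224, overlap=0):
--     assert tile_h > 0 and tile_w > 0
--     stride_h = max(1, tile_h - overlap)
--     stride_w = max(1, tile_w - overlap)
--     ys = _axis_positions(H, tile_h, stride_h)
--     xs = _axis_positions(W, tile_w, stride_w)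
--     return [(y, x, min(tile_h, H - y), min(tile_w, W - x)) for y in ys for x in xs]
-- ===== Notes on version B (the rewrite author's own statement) =====
-- stated objective: simpler
-- what changed: Replaces A's nested clamped while-loops by a closed-form 1D axis-position helper (arithmetic progression of q = ceil((total-tile)/stride) starts plus one clamped last position) for each axis, combined with a nested comprehension.
import Mathlib
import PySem

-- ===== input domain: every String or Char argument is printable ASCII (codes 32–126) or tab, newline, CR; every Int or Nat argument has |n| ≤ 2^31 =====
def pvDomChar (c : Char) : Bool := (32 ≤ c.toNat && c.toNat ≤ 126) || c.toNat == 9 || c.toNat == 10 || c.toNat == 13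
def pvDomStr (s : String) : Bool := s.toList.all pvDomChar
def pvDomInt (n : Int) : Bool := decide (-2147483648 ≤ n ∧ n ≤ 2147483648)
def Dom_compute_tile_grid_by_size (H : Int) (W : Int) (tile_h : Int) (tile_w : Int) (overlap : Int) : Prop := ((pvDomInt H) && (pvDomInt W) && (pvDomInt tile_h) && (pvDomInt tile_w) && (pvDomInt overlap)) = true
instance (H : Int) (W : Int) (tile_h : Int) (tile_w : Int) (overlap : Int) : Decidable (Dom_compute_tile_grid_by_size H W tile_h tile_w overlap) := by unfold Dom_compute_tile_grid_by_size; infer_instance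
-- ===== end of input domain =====

-- B replaces A's nested clamped while-loops by closed-form 1D axis-position lists
-- (arithmetic progression plus one clamped last position) combined by a nested
-- comprehension; objective: simpler.

-- ===== PORT A =====
-- Inner while-loop of A over x, as structural recursion on a fuel bound
-- (the fuel only makes the loop total; it is chosen large enough below).
def pvInnerA (W : Int) (tile_w : Int) (stride_w : Int) (y : Int) (h : Int) :
    Nat → Int → List (Int × Int × Int × Int)
  | 0, _ => []
  | n + 1, x =>
    let w := min tile_w (W - x)
    if W ≤ x + tile_w then [(y, x, h, w)]
    else
      let x1 := x + stride_w
      let x2 := if W < x1 + tile_w then max 0 (W - tile_w) else x1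
      (y, x, h, w) :: pvInnerA W tile_w stride_w y h n x2

-- Outer while-loop of A over y.
def pvOuterA (H : Int) (W : Int) (tile_h : Int) (tile_w : Int) (stride_h : Int) (stride_w : Int) :
    Nat → Int → List (Int × Int × Int × Int)
  | 0, _ => []
  | n + 1, y =>
    let h := min tile_h (H - y)
    let row := pvInnerA W tile_w stride_w y h ((W - tile_w).toNat + 1) 0
    if H ≤ y + tile_h then row
    else
      let y1 := y + stride_h
      let y2 := if H < y1 + tile_h then max 0 (H - tile_h) else y1
      row ++ pvOuterA H W tile_h tile_w stride_h stride_w n y2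

def compute_tile_grid_by_size (H : Int) (W : Int) (tile_h : Int) (tile_w : Int) (overlap : Int) : List (Int × Int × Int × Int) :=
  let stride_h := max 1 (tile_h - overlap)
  let stride_w := max 1 (tile_w - overlap)
  pvOuterA H W tile_h tile_w stride_h stride_w ((H - tile_h).toNat + 1) 0

-- ===== PORT B =====
-- Closed-form 1D start positions: 0, stride, ..., (q-1)*stride, then the clamped
-- last position total-tile; a single tile at 0 when total ≤ tile.
def pvAxisPositionsB (total : Int) (tile : Int) (stride : Int) : List Int :=
  let m := total - tile
  if m ≤ 0 then [0]
  else
    let q := -(PySem.Int.floordiv (-m) stride)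
    ((PySem.List.pyRange 0 q 1).map (fun k => k * stride)) ++ [m]

def compute_tile_grid_by_size_alt (H : Int) (W : Int) (tile_h : Int) (tile_w : Int) (overlap : Int) : List (Int × Int × Int × Int) :=
  let stride_h := max 1 (tile_h - overlap)
  let stride_w := max 1 (tile_w - overlap)
  let ys := pvAxisPositionsB H tile_h stride_h
  let xs := pvAxisPositionsB W tile_w stride_w
  ys.flatMap (fun y => xs.map (fun x => (y, x, min tile_h (H - y), min tile_w (W - x))))

-- ===== PRECONDITION & SPEC =====
-- Pre_: the Python A asserts tile_h > 0 and tile_w > 0 (AssertionError otherwise).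
def Pre_compute_tile_grid_by_size (H : Int) (W : Int) (tile_h : Int) (tile_w : Int) (overlap : Int) : Prop :=
  0 < tile_h ∧ 0 < tile_w
instance (H : Int) (W : Int) (tile_h : Int) (tile_w : Int) (overlap : Int) : Decidable (Pre_compute_tile_grid_by_size H W tile_h tile_w overlap) := by unfold Pre_compute_tile_grid_by_size; infer_instance

def pvWitness_compute_tile_grid_by_size : Int × Int × Int × Int × Int := (7, 5, 3, 2, 1)

def Spec_compute_tile_grid_by_size (H : Int) (W : Int) (tile_h : Int) (tile_w : Int) (overlap : Int) (out : List (Int × Int × Int × Int)) : Prop := out = compute_tile_grid_by_size_alt H W tile_h tile_w overlap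
instance (H : Int) (W : Int) (tile_h : Int) (tile_w : Int) (overlap : Int) (out : List (Int × Int × Int × Int)) : Decidable (Spec_compute_tile_grid_by_size H W tile_h tile_w overlap out) := by unfold Spec_compute_tile_grid_by_size; infer_instance

-- ===== CLAIM (what is proved, stated in full; the proofs are below) =====
def Claim_equal_compute_tile_grid_by_size : Prop := ∀ (H : Int) (W : Int) (tile_h : Int) (tile_w : Int) (overlap : Int), Dom_compute_tile_grid_by_size H W tile_h tile_w overlap → Pre_compute_tile_grid_by_size H W tile_h tile_w overlap → Spec_compute_tile_grid_by_size H W tile_h tile_w overlap (compute_tile_grid_by_size H W tile_h tile_w overlap)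

-- ===== LEMMAS AND PROOFS =====

-- Generic fueled form of A's 1D loop (both of A's loops are instances of it).
def pvLoopPos (total : Int) (tile : Int) (stride : Int) : Nat → Int → List Int
  | 0, _ => []
  | n + 1, p =>
    if total ≤ p + tile then [p]
    else
      p :: pvLoopPos total tile stride n
        (if total < p + stride + tile then max 0 (total - tile) else p + stride)

lemma pvInnerA_eq_map (W tile_w stride_w y h : Int) :
    ∀ (n : Nat) (x : Int),
      pvInnerA W tile_w stride_w y h n x =
        (pvLoopPos W tile_w stride_w n x).map (fun x => (y, x, h, min tile_w (W - x))) := by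
  intro n
  induction n with
  | zero => intro x; rfl
  | succ n ih =>
      intro x
      rw [pvInnerA, pvLoopPos]
      by_cases hbr : W ≤ x + tile_w
      · simp [hbr]
      · simp only [if_neg hbr, List.map_cons]
        exact congrArg₂ List.cons rfl (ih _)

lemma pvOuterA_eq_flatMap (H W tile_h tile_w stride_h stride_w : Int) :
    ∀ (n : Nat) (y : Int),
      pvOuterA H W tile_h tile_w stride_h stride_w n y =
        (pvLoopPos H tile_h stride_h n y).flatMap
          (fun y => pvInnerA W tile_w stride_w y (min tile_h (H - y)) ((W - tile_w).toNat + 1) 0) := by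
  intro n
  induction n with
  | zero => intro y; rfl
  | succ n ih =>
      intro y
      rw [pvOuterA, pvLoopPos]
      by_cases hbr : H ≤ y + tile_h
      · simp [hbr]
      · simp only [if_neg hbr, List.flatMap_cons]
        exact congrArg₂ (· ++ ·) rfl (ih _)

-- q = ceil(m / s) characterisation, via the PySem ceiling-division bracket.
lemma pvQ_brackets (m s : Int) (hs : 1 ≤ s) :
    (-(PySem.Int.floordiv (-m) s) - 1) * s < m ∧ m ≤ -(PySem.Int.floordiv (-m) s) * s :=
  (PySem.Int.neg_floordiv_neg_eq_iff_of_pos (a := m) (b := s)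
    (q := -(PySem.Int.floordiv (-m) s)) (by omega)).mp rfl

-- Key invariant: from position k*s (k steps taken, k < q), A's loop produces the
-- remaining arithmetic positions followed by the clamped last position m.
lemma pvLoopPos_from (total tile s : Int) (hs : 1 ≤ s) :
    ∀ (n : Nat) (k : Nat),
      ((total - tile) - (k : Int) * s).toNat < n →
      (k : Int) * s < total - tile →
      pvLoopPos total tile s n ((k : Int) * s) =
        ((PySem.List.pyRange (k : Int) (-(PySem.Int.floordiv (-(total - tile)) s)) 1).map
          (fun i => i * s)) ++ [total - tile] := by
  set m := total - tile with hmdef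
  set q := -(PySem.Int.floordiv (-m) s) with hqdef
  intro n
  induction n with
  | zero => intro k hle hk; exfalso; omega
  | succ n ih =>
      intro k hle hk
      have hknn : (0 : Int) ≤ (k : Int) * s :=
        mul_nonneg (Int.natCast_nonneg k) (by omega)
      have hm : 0 < m := by omega
      obtain ⟨hq1, hq2⟩ := pvQ_brackets m s hs
      rw [← hqdef] at hq1 hq2
      have hexp : ((k : Int) + 1) * s = (k : Int) * s + s := by ring
      have hkq : (k : Int) < q := by
        by_cases hcon : q ≤ (k : Int)
        · exfalso
          have := mul_le_mul_of_nonneg_right hcon (by omega : (0:Int) ≤ s)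
          omega
        · omega
      rw [pvLoopPos]
      rw [if_neg (by omega : ¬ total ≤ (k : Int) * s + tile)]
      rw [PySem.List.pyRange_one_cons hkq, List.map_cons]
      by_cases hlast : m ≤ ((k : Int) + 1) * s
      · -- next position is clamped (or lands exactly) at m; loop then ends
        have hq : q = (k : Int) + 1 := by
          rcases lt_trichotomy q ((k : Int) + 1) with hlt | heq | hgt
          · exfalso
            have := mul_le_mul_of_nonneg_right (by omega : q ≤ (k : Int)) (by omega : (0:Int) ≤ s)
            omega
          · exact heq
          · exfalso
            have := mul_le_mul_of_nonneg_right (by omega : (k : Int) + 1 ≤ q - 1) (by omega : (0:Int) ≤ s)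
            omega
        have hp2 : (if total < (k : Int) * s + s + tile then max 0 (total - tile) else (k : Int) * s + s) = m := by
          split_ifs <;> omega
        obtain ⟨n', rfl⟩ : ∃ n', n = n' + 1 := ⟨n - 1, by omega⟩
        rw [hp2, pvLoopPos]
        rw [if_pos (by omega : total ≤ m + tile)]
        rw [hq, PySem.List.pyRange_one_eq_nil (by omega)]
        simp
      · -- ordinary step to (k+1)*s
        push_neg at hlast
        have hp2 : (if total < (k : Int) * s + s + tile then max 0 (total - tile) else (k : Int) * s + s) = ((k : Int) + 1) * s := by
          rw [if_neg (by omega)]; omega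
        rw [hp2]
        have hcast : ((k : Int) + 1) = ((k + 1 : Nat) : Int) := by push_cast; ring
        rw [hcast, ih (k + 1) (by push_cast; omega) (by push_cast; omega)]
        rw [← hcast]
        simp

lemma pvLoopPos_zero_eq_axis (total tile s : Int) (hs : 1 ≤ s) :
    pvLoopPos total tile s ((total - tile).toNat + 1) 0 = pvAxisPositionsB total tile s := by
  by_cases hm : total - tile ≤ 0
  · rw [pvLoopPos, pvAxisPositionsB]
    simp only [if_pos (by omega : total ≤ 0 + tile), if_pos hm]
  · push_neg at hm
    have h0 : (0 : Int) = ((0 : Nat) : Int) * s := by simp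
    rw [pvAxisPositionsB]
    simp only [if_neg (by omega : ¬ total - tile ≤ 0)]
    rw [h0, pvLoopPos_from total tile s hs ((total - tile).toNat + 1) 0
      (by simp) (by simpa using hm)]
    norm_num

-- ===== VERDICT (by name: the statement is the Claim_ definition above) =====
theorem compute_tile_grid_by_size_spec : Claim_equal_compute_tile_grid_by_size := by
  intro H W tile_h tile_w overlap _ _
  unfold Spec_compute_tile_grid_by_size
  simp only [compute_tile_grid_by_size, compute_tile_grid_by_size_alt]
  rw [pvOuterA_eq_flatMap, pvLoopPos_zero_eq_axis _ _ _ (le_max_left _ _)]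
  congr 1
  funext y
  rw [pvInnerA_eq_map, pvLoopPos_zero_eq_axis _ _ _ (le_max_left _ _)]
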